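-- pv_equiv track=rewrite | github.com/Lee-jonghwa/Algorithm | subset_sum_2_0809.py | sum_sub
-- ===== SOURCE A (Python) =====
-- def sum_sub(arr, N, K): # arr에서 합계 구하기, K는 목표합계
--     cnt = 0 # 10 만족하는 값 찾기
--     for tar in range(1, 1<<12): # 모든 함수 반복
--         sub_sum = 0
--         sub_cnt = 0
--         for i in range(12):
--             if tar & 0x1: # target과의 & 연산자가 True 인 경우
--                 sub_sum += arr[i]
--                 sub_cnt += 1
--             tar >>= 1
--         # sub_sum과 목표합이 같으면 cnt
--         if sub_cnt == N and sub_sum == K: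
--             cnt += 1
--     return cnt
-- ===== SOURCE B (Python) =====
-- def sum_sub(arr, N, K):
--     # The problem is over the first 12 elements; take them once, then count
--     # size-n subsets summing to k by a pick/skip recursion with pruning,
--     # instead of scanning all 4096 bitmasks.
--     vals = [arr[i] for i in range(12)]
--     if N < 1 or N > 12:
--         return 0
--
--     def count(i, n, k):
--         if n == 0:
--             return 1 if k == 0 else 0
--         if i >= 12 or 12 - i < n:
--             return 0
--         return count(i + 1, n - 1, k - vals[i]) + count(i + 1, n, k)
--
--     return count(0, N, K)
-- ===== Notes on version B (the rewrite author's own statement) =====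
-- stated objective: alternative
-- what changed: A scans all 4096 bitmasks and filters by popcount and sum; B extracts the 12 values once and counts by a pruned pick/skip recursion over positions (size-n suffix subsets summing to k), with an N-in-1..12 bounds guard.
import Mathlib
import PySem

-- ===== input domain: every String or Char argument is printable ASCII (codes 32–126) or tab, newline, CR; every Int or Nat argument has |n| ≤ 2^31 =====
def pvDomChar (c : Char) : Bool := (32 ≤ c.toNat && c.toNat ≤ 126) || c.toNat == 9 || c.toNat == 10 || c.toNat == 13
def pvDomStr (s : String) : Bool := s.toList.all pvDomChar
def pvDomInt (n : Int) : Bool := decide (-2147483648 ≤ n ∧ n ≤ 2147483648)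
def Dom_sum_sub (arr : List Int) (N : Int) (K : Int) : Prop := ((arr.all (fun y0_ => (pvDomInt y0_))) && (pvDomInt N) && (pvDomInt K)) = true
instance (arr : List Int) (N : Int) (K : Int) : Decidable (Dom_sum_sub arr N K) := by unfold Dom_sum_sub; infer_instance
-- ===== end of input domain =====

-- B replaces A's scan of all 4096 bitmasks by a pruned DFS over the 12 positions (alternative algorithm, same results).


-- ===== PORT A =====
-- tar & 0x1 is PySem.Int.band tar 1; tar >>= 1 is Lean's Int >>> (Python-exact);
-- arr[i] is PySem.List.pyGetD (in range for i = 0..11 under Pre_sum_sub).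
def sum_sub (arr : List Int) (N : Int) (K : Int) : Int :=
  (PySem.List.pyRange 1 4096 1).foldl (fun cnt tar0 =>
    let r := (PySem.List.pyRange 0 12 1).foldl
      (fun (st : Int × Int × Int) (i : Int) =>
        (st.1 >>> (1 : Nat),
         if PySem.Int.band st.1 1 ≠ 0
           then (st.2.1 + PySem.List.pyGetD arr i 0, st.2.2 + 1)
           else st.2))
      (tar0, 0, 0)
    if r.2.2 = N ∧ r.2.1 = K then cnt + 1 else cnt) 0

-- ===== PORT B =====
-- B-side helper: the nested 'count' of Source B (pick vals[i] / skip, with the size prune).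
def countSub (vals : List Int) (i : Nat) (n : Int) (k : Int) : Int :=
  if n = 0 then (if k = 0 then 1 else 0)
  else if 12 ≤ i ∨ 12 - (i : Int) < n then 0
  else countSub vals (i+1) (n-1) (k - PySem.List.pyGetD vals (i : Int) 0)
       + countSub vals (i+1) n k
termination_by 12 - i
decreasing_by all_goals omega

-- vals = [arr[i] for i in range(12)] (in range under Pre_sum_sub)
def sum_sub_alt (arr : List Int) (N : Int) (K : Int) : Int :=
  let vals := (PySem.List.pyRange 0 12 1).map (fun i => PySem.List.pyGetD arr i 0)
  if N < 1 ∨ N > 12 then 0 else countSub vals 0 N K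

-- ===== PRECONDITION & SPEC =====
-- Python A reads arr[0..11] for every mask, so it raises IndexError exactly when len(arr) < 12.
def Pre_sum_sub (arr : List Int) (_N : Int) (_K : Int) : Prop := 12 ≤ arr.length
instance (arr : List Int) (N : Int) (K : Int) : Decidable (Pre_sum_sub arr N K) := by
  unfold Pre_sum_sub; infer_instance

def pvWitness_sum_sub : List Int × Int × Int := ([1, 2, 3, 4, 5, 6, 7, 8, 9, 10, 11, 12], 2, 5)

def Spec_sum_sub (arr : List Int) (N : Int) (K : Int) (out : Int) : Prop := out = sum_sub_alt arr N K
instance (arr : List Int) (N : Int) (K : Int) (out : Int) : Decidable (Spec_sum_sub arr N K out) := by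
  unfold Spec_sum_sub; infer_instance

-- ===== CLAIM (what is proved, stated in full; the proofs are below) =====
def Claim_equal_sum_sub : Prop := ∀ (arr : List Int) (N : Int) (K : Int), Dom_sum_sub arr N K → Pre_sum_sub arr N K → Spec_sum_sub arr N K (sum_sub arr N K)

-- ===== LEMMAS AND PROOFS =====

-- The first 12 entries as A's inner loop reads them (default 0 is never used under Pre_).
def valsOf (arr : List Int) : List Int := (List.range 12).map (fun k => arr.getD k 0)

-- (final tar, sub_sum, sub_cnt) computed by A's inner loop over the values vs from bitmask tar.
def fBits : List Int → Int → Int × Int × Int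
  | [], tar => (tar, 0, 0)
  | x :: vs, tar =>
    let r := fBits vs (tar >>> (1 : Nat))
    if PySem.Int.band tar 1 ≠ 0 then (r.1, r.2.1 + x, r.2.2 + 1) else r

-- number of subsets of vs of size n summing to k (common characterisation of both programs)
def cSub : List Int → Int → Int → Nat
  | [], n, k => if n = 0 ∧ k = 0 then 1 else 0
  | x :: vs, n, k => cSub vs n k + cSub vs (n-1) (k-x)

def gCnt (vs : List Int) (n k : Int) : Nat :=
  (List.range (2 ^ vs.length)).countP
    (fun (q : Nat) => decide ((fBits vs ((q : Nat) : Int)).2.2 = n ∧ (fBits vs ((q : Nat) : Int)).2.1 = k))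

theorem valsOf_length (arr : List Int) : (valsOf arr).length = 12 := by simp [valsOf]

theorem shift_even (q : Nat) : ((2*q : Nat) : Int) >>> (1 : Nat) = (q : Int) := by
  simp [Int.shiftRight_eq_div_pow]

theorem shift_odd (q : Nat) : ((2*q+1 : Nat) : Int) >>> (1 : Nat) = (q : Int) := by
  simp [Int.shiftRight_eq_div_pow]; omega

theorem band_even (q : Nat) : PySem.Int.band ((2*q : Nat) : Int) 1 = 0 := by
  rw [PySem.Int.band_one, PySem.Int.mod_eq_emod_of_pos (a := ((2*q : Nat) : Int)) (by omega)]; omega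

theorem band_odd (q : Nat) : PySem.Int.band ((2*q+1 : Nat) : Int) 1 = 1 := by
  rw [PySem.Int.band_one, PySem.Int.mod_eq_emod_of_pos (a := ((2*q+1 : Nat) : Int)) (by omega)]; omega

theorem fBits_zero (vs : List Int) : fBits vs 0 = (0, 0, 0) := by
  induction vs with
  | nil => rfl
  | cons x vs ih => simp [fBits, show (0:Int) >>> (1:Nat) = 0 from by decide,
      show PySem.Int.band 0 1 = 0 from by decide, ih]

theorem fBits_even (vs : List Int) (x : Int) (q : Nat) :
    fBits (x :: vs) ((2*q : Nat) : Int) = fBits vs (q : Int) := by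
  simp only [fBits, band_even, shift_even]
  simp

theorem fBits_odd (vs : List Int) (x : Int) (q : Nat) :
    fBits (x :: vs) ((2*q+1 : Nat) : Int) =
      ((fBits vs (q : Int)).1, (fBits vs (q : Int)).2.1 + x, (fBits vs (q : Int)).2.2 + 1) := by
  simp only [fBits, band_odd, shift_odd]
  simp

-- A's inner loop over index list js computes fBits of the corresponding values.
theorem inner_foldl (arr : List Int) (js : List Int) :
    ∀ (tar s c : Int),
      js.foldl
        (fun (st : Int × Int × Int) (i : Int) =>
          (st.1 >>> (1 : Nat),
           if PySem.Int.band st.1 1 ≠ 0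
             then (st.2.1 + PySem.List.pyGetD arr i 0, st.2.2 + 1)
             else st.2))
        (tar, s, c)
      = ((fBits (js.map (fun i => PySem.List.pyGetD arr i 0)) tar).1,
         s + (fBits (js.map (fun i => PySem.List.pyGetD arr i 0)) tar).2.1,
         c + (fBits (js.map (fun i => PySem.List.pyGetD arr i 0)) tar).2.2) := by
  induction js with
  | nil => intro tar s c; simp [fBits]
  | cons j js ih =>
    intro tar s c
    simp only [List.foldl_cons, List.map_cons, fBits]
    rw [ih]
    by_cases h : PySem.Int.band tar 1 ≠ 0
    · simp [h]; ring_nf; simp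
    · simp [h]

theorem vals_map_pyRange (arr : List Int) :
    (PySem.List.pyRange 0 12 1).map (fun i => PySem.List.pyGetD arr i 0) = valsOf arr := by
  rw [PySem.List.pyRange_one]
  simp [valsOf, List.map_map, Function.comp_def]

theorem countP_range_double (p : Nat → Bool) (m : Nat) :
    (List.range (2*m)).countP p
      = (List.range m).countP (fun q => p (2*q)) + (List.range m).countP (fun q => p (2*q+1)) := by
  induction m with
  | zero => rfl
  | succ m ih =>
    rw [show 2*(m+1) = (2*m+1)+1 from rfl]
    simp only [List.range_succ, List.countP_append, ih, List.countP_cons, List.countP_nil]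
    omega

theorem gCnt_eq_cSub (vs : List Int) : ∀ (n k : Int), gCnt vs n k = cSub vs n k := by
  induction vs with
  | nil =>
    intro n k
    unfold gCnt cSub
    rw [show List.range (2 ^ ([] : List Int).length) = [0] from rfl, List.countP_cons]
    by_cases hn : n = 0 <;> by_cases hk : k = 0 <;> simp [hn, hk, fBits, eq_comm]
  | cons x vs ih =>
    intro n k
    have hlen : (2 : Nat) ^ (x :: vs).length = 2 * 2 ^ vs.length := by
      simp [pow_succ, Nat.mul_comm]
    unfold gCnt
    rw [hlen, countP_range_double]
    simp only [fBits_even, fBits_odd]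
    have hcond : ∀ (a b : Int), ((a + 1 = n ∧ b + x = k) ↔ (a = n - 1 ∧ b = k - x)) := by
      intro a b; constructor <;> rintro ⟨h1, h2⟩ <;> constructor <;> omega
    simp only [hcond]
    show gCnt vs n k + gCnt vs (n-1) (k-x) = cSub (x :: vs) n k
    rw [ih, ih]
    rfl

-- A counts, over all masks 1..4095, the subsets with popcount N and sum K; mask 0 is the corrective term.
theorem A_char (arr : List Int) (N K : Int) :
    sum_sub arr N K + (if (0:Int) = N ∧ (0:Int) = K then 1 else 0)
      = (gCnt (valsOf arr) N K : Int) := by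
  unfold sum_sub
  simp only [inner_foldl arr, vals_map_pyRange, zero_add]
  have hc := PySem.List.foldl_count_if
    (fun tar => decide ((fBits (valsOf arr) tar).2.2 = N ∧ (fBits (valsOf arr) tar).2.1 = K))
    (PySem.List.pyRange 1 4096 1) 0
  simp only [decide_eq_true_eq] at hc
  rw [hc, zero_add]
  have hg : gCnt (valsOf arr) N K
      = (PySem.List.pyRange 0 4096 1).countP
          (fun tar => decide ((fBits (valsOf arr) tar).2.2 = N ∧ (fBits (valsOf arr) tar).2.1 = K)) := by
    unfold gCnt
    rw [valsOf_length, PySem.List.pyRange_one, List.countP_map]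
    norm_num [Function.comp_def]
    rw [show ((4096:Int)).toNat = 4096 from rfl]
  have hsplit : PySem.List.pyRange 0 4096 1 = 0 :: PySem.List.pyRange 1 4096 1 :=
    PySem.List.pyRange_one_cons (by omega)
  rw [hg, hsplit, List.countP_cons]
  simp only [fBits_zero, decide_eq_true_eq]
  push_cast
  split_ifs <;> omega

theorem cSub_of_neg (vs : List Int) : ∀ (n k : Int), n < 0 → cSub vs n k = 0 := by
  induction vs with
  | nil => intro n k hn; simp [cSub]; omega
  | cons x vs ih => intro n k hn; simp [cSub, ih _ _ hn, ih _ _ (by omega : n - 1 < 0)]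

theorem cSub_of_length_lt (vs : List Int) :
    ∀ (n k : Int), (vs.length : Int) < n → cSub vs n k = 0 := by
  induction vs with
  | nil => intro n k hn; simp at hn; simp [cSub]; omega
  | cons x vs ih =>
    intro n k hn
    simp only [List.length_cons] at hn
    push_cast at hn
    have h1 : (vs.length : Int) < n := by omega
    have h2 : (vs.length : Int) < n - 1 := by omega
    simp only [cSub, ih _ _ h1, ih _ (k - x) h2]

theorem cSub_zero (vs : List Int) (k : Int) : cSub vs 0 k = if k = 0 then 1 else 0 := by
  induction vs generalizing k with
  | nil => simp [cSub]
  | cons x vs ih => simp [cSub, ih, cSub_of_neg vs (-1) (k - x) (by omega)]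

theorem B_char (arr : List Int) (i : Nat) (n k : Int) :
    countSub (valsOf arr) i n k = (cSub ((valsOf arr).drop i) n k : Int) := by
  fun_induction countSub (valsOf arr) i n k with
  | case1 i => rw [cSub_zero]; simp
  | case2 i k hk => rw [cSub_zero]; simp [hk]
  | case3 i n k hn hstop =>
    rcases hstop with h12 | hlt
    · rw [List.drop_eq_nil_of_le (by rw [valsOf_length]; omega)]
      simp [cSub, hn]
    · by_cases h12 : 12 ≤ i
      · rw [List.drop_eq_nil_of_le (by rw [valsOf_length]; omega)]
        simp [cSub, hn]
      · rw [cSub_of_length_lt]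
        · simp
        · rw [List.length_drop, valsOf_length]; omega
  | case4 i n k hn hstop ih2 ih1 =>
    have hi : i < 12 := by omega
    have hdrop : (valsOf arr).drop i = arr.getD i 0 :: (valsOf arr).drop (i+1) := by
      rw [List.drop_eq_getElem_cons (by rw [valsOf_length]; omega)]
      congr 1
      simp [valsOf]
    have hval : PySem.List.pyGetD (valsOf arr) (i : Int) 0 = arr.getD i 0 := by
      rw [PySem.List.pyGetD_natCast]
      simp [valsOf, List.getD_eq_getElem?_getD, hi]
    rw [hdrop]
    rw [hval] at ih2 ⊢
    rw [ih1, ih2]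
    simp only [cSub]
    push_cast
    ring

-- ===== VERDICT (by name: the statement is the Claim_ definition above) =====
theorem sum_sub_spec : Claim_equal_sum_sub := by
  intro arr N K _ _
  unfold Spec_sum_sub sum_sub_alt
  dsimp only
  have hA := A_char arr N K
  rw [gCnt_eq_cSub] at hA
  split_ifs with h
  · have hc : ((cSub (valsOf arr) N K : Nat) : Int) = if (0:Int) = N ∧ (0:Int) = K then 1 else 0 := by
      rcases h with h | h
      · by_cases hN0 : N = 0
        · subst hN0
          rw [cSub_zero]
          by_cases hK : K = 0 <;> simp [hK, eq_comm]
        · rw [cSub_of_neg _ N K (by omega)]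
          simp [show ¬((0:Int) = N) from by omega]
      · rw [cSub_of_length_lt _ N K (by rw [valsOf_length]; exact_mod_cast (by omega : (12:Int) < N))]
        simp [show ¬((0:Int) = N) from by omega]
    rw [hc] at hA
    omega
  · have hB := B_char arr 0 N K
    simp only [List.drop_zero] at hB
    rw [vals_map_pyRange, hB]
    rw [if_neg (by omega : ¬((0:Int) = N ∧ (0:Int) = K))] at hA
    omega
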